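-- pv_equiv track=rewrite | github.com/emarberg/schurp | key.py | sorting_permutation
-- ===== SOURCE A (Python) =====
-- def sorting_permutation(weak_comp):
--     word = []
--     n = len(weak_comp)
--     weak_comp = list(weak_comp)
--     for i in range(n):
--         for j in range(i, 0, -1):
--             if weak_comp[j] > weak_comp[j - 1]:
--                 word += [j]
--                 weak_comp[j - 1], weak_comp[j] = weak_comp[j], weak_comp[j - 1]
--     return tuple(word)
-- ===== SOURCE B (Python) =====
-- def sorting_permutation(weak_comp):
--     word = []
--     for i, v in enumerate(weak_comp):
--         c = sum(1 for u in weak_comp[:i] if u < v)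
--         word.extend(i - k for k in range(c))
--     return tuple(word)
-- ===== Notes on version B (the rewrite author's own statement) =====
-- stated objective: alternative
-- what changed: Replaces the in-place insertion-sort with recorded swaps by a direct per-index count: for each i, count earlier entries strictly smaller than weak_comp[i] and emit the descending run of that length; no mutation and no auxiliary array.
import Mathlib
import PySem

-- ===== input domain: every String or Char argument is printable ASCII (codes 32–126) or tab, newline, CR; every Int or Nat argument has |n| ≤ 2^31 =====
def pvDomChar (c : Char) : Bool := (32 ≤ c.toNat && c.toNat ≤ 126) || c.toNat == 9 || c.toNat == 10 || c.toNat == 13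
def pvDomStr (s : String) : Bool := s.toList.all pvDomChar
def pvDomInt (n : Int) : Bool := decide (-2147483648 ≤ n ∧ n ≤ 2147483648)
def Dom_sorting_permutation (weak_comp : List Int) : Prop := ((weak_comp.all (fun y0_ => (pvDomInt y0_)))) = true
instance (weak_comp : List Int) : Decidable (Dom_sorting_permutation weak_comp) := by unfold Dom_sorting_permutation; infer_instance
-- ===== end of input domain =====

-- B replaces A's in-place insertion sort with recorded swaps by a direct per-index
-- count of strictly smaller earlier entries (alternative decomposition, no mutation).

-- ===== PORT A =====
-- inner loop: `for j in range(i, 0, -1)` — processes j, j-1, …, 1 on state (word, arr);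
-- list indexing/assignment via getD/set (indices are always in range here).
def pvInnerA : List Int × List Int → Nat → List Int × List Int
  | st, 0 => st
  | (word, arr), j + 1 =>
      if arr.getD (j + 1) 0 > arr.getD j 0 then
        pvInnerA (word ++ [((j + 1 : Nat) : Int)],
          (arr.set j (arr.getD (j + 1) 0)).set (j + 1) (arr.getD j 0)) j
      else
        pvInnerA (word, arr) j

def sorting_permutation (weak_comp : List Int) : List Int :=
  ((List.range weak_comp.length).foldl (fun st i => pvInnerA st i) ([], weak_comp)).1

-- ===== PORT B =====
def sorting_permutation_alt (weak_comp : List Int) : List Int :=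
  (List.range weak_comp.length).foldl
    (fun word i =>
      let v := weak_comp.getD i 0
      let c := (weak_comp.take i).countP (fun u => decide (u < v))
      word ++ (List.range c).map (fun k : Nat => (i : Int) - (k : Int)))
    []

-- ===== PRECONDITION & SPEC =====
def Spec_sorting_permutation (weak_comp : List Int) (out : List Int) : Prop := out = sorting_permutation_alt weak_comp
instance (weak_comp : List Int) (out : List Int) : Decidable (Spec_sorting_permutation weak_comp out) := by unfold Spec_sorting_permutation; infer_instance

-- ===== CLAIM (what is proved, stated in full; the proofs are below) =====
def Claim_equal_sorting_permutation : Prop := ∀ (weak_comp : List Int), Dom_sorting_permutation weak_comp → Spec_sorting_permutation weak_comp (sorting_permutation weak_comp)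

-- ===== LEMMAS AND PROOFS =====

-- descending insertion (what A's bubble achieves on the sorted prefix)
def pvIns (acc : List Int) (x : Int) : List Int :=
  acc.takeWhile (fun y => x ≤ y) ++ x :: acc.dropWhile (fun y => x ≤ y)

def pvSortD (l : List Int) : List Int := l.foldl pvIns []

lemma pvIns_perm (acc : List Int) (x : Int) : (pvIns acc x).Perm (x :: acc) := by
  unfold pvIns
  simpa [List.takeWhile_append_dropWhile] using
    (List.perm_middle (a := x) (l₁ := acc.takeWhile (fun y => x ≤ y))
      (l₂ := acc.dropWhile (fun y => x ≤ y)))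

lemma pvSortD_perm (l : List Int) : (pvSortD l).Perm l := by
  have h : ∀ (acc l : List Int), (l.foldl pvIns acc).Perm (acc ++ l) := by
    intro acc l
    induction l generalizing acc with
    | nil => simp
    | cons x t ih =>
        simp only [List.foldl_cons]
        refine (ih (pvIns acc x)).trans ?_
        have := (pvIns_perm acc x).append_right t
        refine this.trans ?_
        exact List.perm_middle.symm
  simpa using h [] l

lemma pvIns_sorted {acc : List Int} (x : Int)
    (h : acc.Pairwise (fun a b => b ≤ a)) : (pvIns acc x).Pairwise (fun a b => b ≤ a) := by
  unfold pvIns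
  have hsplit : acc = acc.takeWhile (fun y => x ≤ y) ++ acc.dropWhile (fun y => x ≤ y) :=
    (List.takeWhile_append_dropWhile).symm
  rw [hsplit] at h
  rw [List.pairwise_append] at h ⊢
  obtain ⟨h1, h2, h3⟩ := h
  refine ⟨h1, ?_, ?_⟩
  · -- x :: dropWhile is sorted
    rw [List.pairwise_cons]
    refine ⟨?_, h2⟩
    intro y hy
    -- head of dropWhile < x, rest ≤ head
    rcases hd : acc.dropWhile (fun y => x ≤ y) with _ | ⟨z, t⟩
    · rw [hd] at hy; simp at hy
    · have hz : ¬ (x ≤ z) := by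
        have := List.head_dropWhile_not (p := fun y => x ≤ y) (l := acc)
          (by rw [hd]; simp)
        simpa [hd] using this
      rw [hd] at hy h2
      rcases List.mem_cons.mp hy with rfl | hyt
      · omega
      · have := (List.pairwise_cons.mp h2).1 y hyt
        omega
  · intro u hu w hw
    rcases List.mem_cons.mp hw with rfl | hwt
    · simpa using List.mem_takeWhile_imp hu
    · exact h3 u hu w hwt

lemma pvSortD_sorted (l : List Int) : (pvSortD l).Pairwise (fun a b => b ≤ a) := by
  have h : ∀ (l acc : List Int), acc.Pairwise (fun a b => b ≤ a) →
      (l.foldl pvIns acc).Pairwise (fun a b => b ≤ a) := by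
    intro l
    induction l with
    | nil => intro acc h; simpa using h
    | cons x t ih => intro acc h; exact ih _ (pvIns_sorted x h)
  exact h l [] (by simp)

lemma pvSortD_length (l : List Int) : (pvSortD l).length = l.length :=
  (pvSortD_perm l).length_eq

-- getD / set on an append at the junction index
lemma pv_getD_len (c : List Int) (x : Int) (r : List Int) :
    (c ++ x :: r).getD c.length 0 = x := by
  induction c with
  | nil => rfl
  | cons a t ih => simp


lemma pv_getD_len1 (c : List Int) (x v : Int) (r : List Int) :
    (c ++ x :: v :: r).getD (c.length + 1) 0 = v := by
  induction c with
  | nil => rfl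
  | cons a t ih => simp

lemma pv_set_len (c : List Int) (y x : Int) (r : List Int) :
    (c ++ x :: r).set c.length y = c ++ y :: r := by
  induction c with
  | nil => rfl
  | cons a t ih => simp [ih]

lemma pv_set_len1 (c : List Int) (y x v : Int) (r : List Int) :
    (c ++ x :: v :: r).set (c.length + 1) y = c ++ x :: y :: r := by
  induction c with
  | nil => rfl
  | cons a t ih => simp [ih]

-- one bubble step: swap v with its left neighbour x (< v) and record the swap
lemma pv_step (c : List Int) (x v : Int) (r word : List Int) (h : x < v) :
    pvInnerA (word, c ++ x :: v :: r) (c.length + 1)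
      = pvInnerA (word ++ [((c.length + 1 : Nat) : Int)], c ++ v :: x :: r) c.length := by
  rw [pvInnerA, pv_getD_len1, pv_getD_len c x (v :: r), if_pos (by omega),
    pv_set_len c v x (v :: r), pv_set_len1]

-- no swap happens while scanning a sorted prefix
lemma pv_noswap (a r word : List Int)
    (hs : a.Pairwise (fun u v => v ≤ u)) :
    ∀ j, j < a.length → pvInnerA (word, a ++ r) j = (word, a ++ r) := by
  intro j
  induction j with
  | zero => intro _; rfl
  | succ j ih =>
      intro hj
      have hj' : j < a.length := by omega
      have hle : (a ++ r).getD (j + 1) 0 ≤ (a ++ r).getD j 0 := by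
        rw [List.getD_append _ _ _ _ hj, List.getD_append _ _ _ _ hj',
          List.getD_eq_getElem _ _ hj, List.getD_eq_getElem _ _ hj']
        exact List.pairwise_iff_getElem.mp hs j (j + 1) hj' hj (by omega)
      rw [pvInnerA, if_neg (by omega)]
      exact ih hj' 

-- the bubble phase: v moves left past b (all entries of b are < v)
lemma pv_bubble (a b : List Int) (v : Int) (r word : List Int)
    (hb : ∀ x ∈ b, x < v) :
    pvInnerA (word, a ++ b ++ v :: r) (a.length + b.length)
      = pvInnerA (word ++ (List.range b.length).map
            (fun k : Nat => ((a.length + b.length : Nat) : Int) - (k : Int)),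
          a ++ v :: (b ++ r)) a.length := by
  induction b using List.reverseRecOn generalizing r word with
  | nil => simp
  | append_singleton b' x ih =>
      have hx : x < v := hb x (by simp)
      have hb' : ∀ y ∈ b', y < v := fun y hy => hb y (by simp [hy])
      have e1 : a ++ (b' ++ [x]) ++ v :: r = (a ++ b') ++ x :: v :: r := by simp
      have e2 : a.length + (b' ++ [x]).length = (a ++ b').length + 1 := by
        simp only [List.length_append, List.length_cons, List.length_nil]
        omega
      rw [e1, e2, pv_step _ _ _ _ _ hx]
      have e4 : (a ++ b').length = a.length + b'.length := by simp
      rw [e4, ih (x :: r) _ hb']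
      have hword : (List.range (b'.length + 1)).map
            (fun k : Nat => ((a.length + b'.length + 1 : Nat) : Int) - (k : Int))
          = ((a.length + b'.length + 1 : Nat) : Int) ::
            (List.range b'.length).map
              (fun k : Nat => ((a.length + b'.length : Nat) : Int) - (k : Int)) := by
        rw [List.range_succ_eq_map]
        simp only [List.map_cons, List.map_map]
        refine List.cons_eq_cons.mpr ⟨?_, ?_⟩
        · push_cast; ring
        · apply List.map_congr_left
          intro k _
          simp only [Function.comp_apply]
          push_cast; ring
      have e5 : (b' ++ [x]).length = b'.length + 1 := by simp
      rw [e5, hword]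
      simp

-- the full inner loop on (sorted prefix p) ++ v :: r
lemma pv_inner_spec (p : List Int) (v : Int) (r word : List Int)
    (hs : p.Pairwise (fun u w => w ≤ u)) :
    pvInnerA (word, p ++ v :: r) p.length
      = (word ++ (List.range ((p.countP (fun u => decide (u < v))))).map
            (fun k : Nat => ((p.length : Nat) : Int) - (k : Int)),
         pvIns p v ++ r) := by
  set a := p.takeWhile (fun y => v ≤ y) with ha
  set b := p.dropWhile (fun y => v ≤ y) with hbdef
  have hsplit : p = a ++ b := (List.takeWhile_append_dropWhile).symm
  have hb : ∀ x ∈ b, x < v := by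
    intro x hx
    rcases hd : b with _ | ⟨z, t⟩
    · rw [hd] at hx; simp at hx
    · have hz : ¬ (v ≤ z) := by
        have := List.head_dropWhile_not (p := fun y => v ≤ y) (l := p)
          (by rw [← hbdef, hd]; simp)
        simpa [← hbdef, hd] using this
      have hbs : b.Pairwise (fun u w => w ≤ u) := by
        rw [hsplit] at hs; exact (List.pairwise_append.mp hs).2.1
      rw [hd] at hx hbs
      rcases List.mem_cons.mp hx with rfl | hxt
      · omega
      · have := (List.pairwise_cons.mp hbs).1 x hxt
        omega
  have ha_ge : ∀ x ∈ a, v ≤ x := by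
    intro x hx
    rw [ha] at hx
    simpa using List.mem_takeWhile_imp hx
  have hcount : p.countP (fun u => decide (u < v)) = b.length := by
    rw [hsplit, List.countP_append]
    have h1 : a.countP (fun u => decide (u < v)) = 0 := by
      rw [List.countP_eq_zero]
      intro x hx
      have := ha_ge x hx
      simp; omega
    have h2 : b.countP (fun u => decide (u < v)) = b.length := by
      rw [List.countP_eq_length]
      intro x hx
      have := hb x hx
      simp; omega
    omega
  have hlen : p.length = a.length + b.length := by rw [hsplit]; simp
  have harr : p ++ v :: r = a ++ b ++ v :: r := by rw [hsplit]
  rw [harr, hlen, pv_bubble a b v r word hb]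
  have hsa : (a ++ [v]).Pairwise (fun u w => w ≤ u) := by
    rw [List.pairwise_append]
    refine ⟨?_, by simp, ?_⟩
    · rw [hsplit] at hs; exact (List.pairwise_append.mp hs).1
    · intro x hx y hy
      simp at hy; subst hy
      exact ha_ge x hx
  have hlt : a.length < (a ++ [v]).length := by simp
  have hres := pv_noswap (a ++ [v]) (b ++ r)
    (word ++ (List.range b.length).map
      (fun k : Nat => ((a.length + b.length : Nat) : Int) - (k : Int))) hsa a.length hlt
  have harr3 : a ++ v :: (b ++ r) = (a ++ [v]) ++ (b ++ r) := by simp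
  rw [harr3, hres]
  simp [pvIns, ← ha, ← hbdef, hcount]

-- outer invariant
lemma pv_outer (wc : List Int) :
    ∀ i, i ≤ wc.length →
      (List.range i).foldl (fun st k => pvInnerA st k) ([], wc)
        = ((List.range i).foldl
            (fun word k =>
              let v := wc.getD k 0
              let c := (wc.take k).countP (fun u => decide (u < v))
              word ++ (List.range c).map (fun j : Nat => (k : Int) - (j : Int))) [],
           pvSortD (wc.take i) ++ wc.drop i) := by
  intro i
  induction i with
  | zero => intro _; simp [pvSortD]
  | succ i ih =>
      intro hi
      have hi' : i ≤ wc.length := by omega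
      have hilt : i < wc.length := by omega
      rw [List.range_succ, List.foldl_append, List.foldl_append, ih hi']
      simp only [List.foldl_cons, List.foldl_nil]
      have hdrop : wc.drop i = wc[i] :: wc.drop (i+1) :=
        List.drop_eq_getElem_cons hilt
      have hplen : (pvSortD (wc.take i)).length = i := by
        rw [pvSortD_length, List.length_take]; omega
      rw [hdrop]
      have := pv_inner_spec (pvSortD (wc.take i)) wc[i] (wc.drop (i+1))
        ((List.range i).foldl
            (fun word k =>
              let v := wc.getD k 0
              let c := (wc.take k).countP (fun u => decide (u < v))
              word ++ (List.range c).map (fun j : Nat => (k : Int) - (j : Int))) [])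
        (pvSortD_sorted _)
      rw [hplen] at this
      rw [this]
      have hgetD : wc.getD i 0 = wc[i] := List.getD_eq_getElem _ _ hilt
      have hcnt : (pvSortD (wc.take i)).countP (fun u => decide (u < wc[i]))
          = (wc.take i).countP (fun u => decide (u < wc[i])) :=
        (pvSortD_perm (wc.take i)).countP_eq _
      have hins : pvIns (pvSortD (wc.take i)) wc[i] = pvSortD (wc.take (i + 1)) := by
        have htake : wc.take (i + 1) = wc.take i ++ [wc[i]] :=
          List.take_succ_eq_append_getElem hilt
        unfold pvSortD
        rw [htake, List.foldl_append]
        simp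
      simp only [hgetD, hcnt, hins]

-- ===== VERDICT (by name: the statement is the Claim_ definition above) =====
theorem sorting_permutation_spec : Claim_equal_sorting_permutation := by
  intro wc _
  unfold Spec_sorting_permutation sorting_permutation sorting_permutation_alt
  rw [pv_outer wc wc.length (le_refl _)]
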